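-- pv_equiv track=rewrite | github.com/janyanti/Rhythm-Rider- | MusicAnalyzer.py | getNotePairs
-- ===== SOURCE A (Python) =====
-- import copy
--
-- def getNotePairs(song):
--     # find on/off note pairs with note durations
--     notes = copy.deepcopy(song)
--     pairs = []
--     while len(notes) > 0:
--         data = notes.pop(0)
--         note_on = data[0]
--         startTime = data[-1]
--         currNote = note_on[1]
--         for i, elem in enumerate(notes):
--             data = notes[i]
--             note_off = data[0]
--             nextNote = note_off[1]
--             endTime = data[-1]
--             if nextNote == currNote:
--                 notes.pop(i)
--                 pairs.append((note_on, endTime - startTime))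
--                 break
--     return pairs
-- ===== SOURCE B (Python) =====
-- def getNotePairs(song):
--     # O(n): one backward pass records each position's next same-pitch time,
--     # one forward pass emits a pair at every even-count occurrence that has a successor.
--     n = len(song)
--     nxt = [None] * n
--     seen = {}
--     for i in range(n - 1, -1, -1):
--         note_on, t = song[i][0], song[i][-1]
--         p = note_on[1]
--         nxt[i] = seen.get(p)
--         seen[p] = t
--     out = []
--     cnt = {}
--     for i in range(n):
--         note_on, t = song[i][0], song[i][-1]
--         p = note_on[1]
--         c = cnt.get(p, 0)
--         if c % 2 == 0 and nxt[i] is not None: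
--             out.append((note_on, nxt[i] - t))
--         cnt[p] = c + 1
--     return out
-- ===== Notes on version B (the rewrite author's own statement) =====
-- stated objective: faster
-- what changed: Replaces A's quadratic pop-the-head-and-scan-for-a-partner loop with two linear dict passes: a backward pass recording each position's next same-pitch time, and a forward pass that emits a pair at every occurrence whose same-pitch count so far is even and that has a later same-pitch occurrence.
import Mathlib
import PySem

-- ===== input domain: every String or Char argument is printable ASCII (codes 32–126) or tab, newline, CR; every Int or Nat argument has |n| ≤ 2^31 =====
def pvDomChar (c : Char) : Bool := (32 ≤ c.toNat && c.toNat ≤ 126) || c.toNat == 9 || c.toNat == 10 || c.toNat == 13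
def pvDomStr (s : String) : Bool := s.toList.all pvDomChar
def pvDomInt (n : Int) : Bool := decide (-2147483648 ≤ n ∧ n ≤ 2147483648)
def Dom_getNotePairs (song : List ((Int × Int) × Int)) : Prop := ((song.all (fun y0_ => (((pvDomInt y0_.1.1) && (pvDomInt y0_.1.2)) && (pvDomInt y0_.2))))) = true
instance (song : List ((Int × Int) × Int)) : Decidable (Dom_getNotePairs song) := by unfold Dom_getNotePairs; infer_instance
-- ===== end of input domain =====

-- B replaces A's quadratic pop-and-scan pairing by two linear dict passes
-- (next same-pitch time per position, then emit at even-count occurrences); return value only, A mutates nothing observable.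

-- ===== PORT A =====
-- A's inner 'for i, elem in enumerate(notes): if nextNote == currNote: notes.pop(i); break':
-- returns the matched element's time and the remaining list with it removed.
def pvFindOff (curr : Int) : List ((Int × Int) × Int) → Option (Int × List ((Int × Int) × Int))
  | [] => none
  | d :: rest =>
    if d.1.2 = curr then some (d.2, rest)
    else
      match pvFindOff curr rest with
      | some (e, r) => some (e, d :: r)
      | none => none

theorem pvFindOff_length (curr : Int) (l : List ((Int × Int) × Int)) (t : Int)
    (r : List ((Int × Int) × Int)) (h : pvFindOff curr l = some (t, r)) :
    r.length + 1 = l.length := by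
  induction l generalizing r with
  | nil => simp [pvFindOff] at h
  | cons d rest ih =>
    simp only [pvFindOff] at h
    split at h
    · cases h; simp
    · cases hf : pvFindOff curr rest with
      | none => rw [hf] at h; cases h
      | some p =>
        rw [hf] at h
        obtain ⟨e, r'⟩ := p
        cases h
        simp [ih r' hf]

-- A's outer 'while len(notes) > 0: data = notes.pop(0); …'
def getNotePairs (song : List ((Int × Int) × Int)) : List ((Int × Int) × Int) :=
  match song with
  | [] => []
  | data :: notes =>
    match h : pvFindOff data.1.2 notes with
    | some (endTime, rest) => (data.1, endTime - data.2) :: getNotePairs rest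
    | none => getNotePairs notes
termination_by song.length
decreasing_by
  · have := pvFindOff_length data.1.2 notes endTime rest h
    simp; omega
  · simp

-- ===== PORT B =====
-- backward pass: nxt[i] = seen.get(p); seen[p] = t  (rightmost index first)
def pvNxts : List ((Int × Int) × Int) → (List (Option Int) × PySem.Dict Int Int)
  | [] => ([], PySem.Dict.empty)
  | d :: rest =>
    let (l, seen) := pvNxts rest
    (seen.get? d.1.2 :: l, seen.insert d.1.2 d.2)

-- forward pass: c = cnt.get(p, 0); if c % 2 == 0 and nxt[i] is not None: emit; cnt[p] = c + 1
def pvEmit : List ((Int × Int) × Int) → List (Option Int) → PySem.Dict Int Int → List ((Int × Int) × Int)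
  | [], _, _ => []
  | d :: rest, nx :: nxs, cnt =>
    let c := cnt.getD d.1.2 0
    let cnt' := cnt.insert d.1.2 (c + 1)
    if PySem.Int.mod c 2 = 0 then
      match nx with
      | some t' => (d.1, t' - d.2) :: pvEmit rest nxs cnt'
      | none => pvEmit rest nxs cnt'
    else pvEmit rest nxs cnt'
  | _ :: _, [], _ => []   -- unreachable: nxt list has the same length as song

def getNotePairs_alt (song : List ((Int × Int) × Int)) : List ((Int × Int) × Int) :=
  pvEmit song (pvNxts song).1 PySem.Dict.empty

-- ===== PRECONDITION & SPEC =====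
def Spec_getNotePairs (song : List ((Int × Int) × Int)) (out : List ((Int × Int) × Int)) : Prop := out = getNotePairs_alt song
instance (song : List ((Int × Int) × Int)) (out : List ((Int × Int) × Int)) : Decidable (Spec_getNotePairs song out) := by unfold Spec_getNotePairs; infer_instance

-- ===== CLAIM (what is proved, stated in full; the proofs are below) =====
def Claim_equal_getNotePairs : Prop := ∀ (song : List ((Int × Int) × Int)), Dom_getNotePairs song → Spec_getNotePairs song (getNotePairs song)

-- ===== LEMMAS AND PROOFS =====

-- proof-layer: the next-time list position by position
def specNxt : List ((Int × Int) × Int) → List (Option Int)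
  | [] => []
  | d :: rest => (rest.find? (fun x => x.1.2 == d.1.2)).map (·.2) :: specNxt rest

-- proof-layer: forward pass carrying only the parity of each pitch count
def pvG : List ((Int × Int) × Int) → (Int → Bool) → List ((Int × Int) × Int)
  | [], _ => []
  | d :: rest, S =>
    if S d.1.2 then pvG rest (fun q => if q = d.1.2 then false else S q)
    else
      match rest.find? (fun x => x.1.2 == d.1.2) with
      | some x => (d.1, x.2 - d.2) :: pvG rest (fun q => if q = d.1.2 then true else S q)
      | none => pvG rest (fun q => if q = d.1.2 then true else S q)

-- proof-layer: remove, for each marked pitch, its first occurrence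
def pvStrip : List ((Int × Int) × Int) → (Int → Bool) → List ((Int × Int) × Int)
  | [], _ => []
  | d :: rest, S =>
    if S d.1.2 then pvStrip rest (fun q => if q = d.1.2 then false else S q)
    else d :: pvStrip rest S

theorem pvNxts_get? (l : List ((Int × Int) × Int)) (p : Int) :
    ((pvNxts l).2).get? p = (l.find? (fun x => x.1.2 == p)).map (·.2) := by
  induction l with
  | nil => simp [pvNxts, PySem.Dict.get?_empty]
  | cons d rest ih =>
    simp only [pvNxts]
    rw [PySem.Dict.get?_insert]
    by_cases h : p = d.1.2
    · subst h
      simp [List.find?]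
    · have hbe : (d.1.2 == p) = false := by
        simp only [beq_eq_false_iff_ne, ne_eq]
        exact fun hh => h hh.symm
      rw [if_neg h]
      simp only [List.find?, hbe]
      exact ih

theorem pvNxts_fst (l : List ((Int × Int) × Int)) : (pvNxts l).1 = specNxt l := by
  induction l with
  | nil => rfl
  | cons d rest ih =>
    simp only [pvNxts, specNxt]
    rw [pvNxts_get?]
    exact congrArg _ ih

theorem pvEmit_eq_pvG (l : List ((Int × Int) × Int)) (cnt : PySem.Dict Int Int) (f : Int → Int)
    (hc : ∀ p, cnt.getD p 0 = f p) (hnn : ∀ p, 0 ≤ f p) :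
    pvEmit l (specNxt l) cnt = pvG l (fun p => decide (f p % 2 = 1)) := by
  induction l generalizing cnt f with
  | nil => rfl
  | cons d rest ih =>
    simp only [pvEmit, specNxt, pvG]
    set p := d.1.2 with hp
    have hcp : cnt.getD p 0 = f p := hc p
    have hmod : PySem.Int.mod (cnt.getD p 0) 2 = f p % 2 := by
      rw [hcp, PySem.Int.mod_eq_emod_of_pos (by omega)]
    have hpar : f p % 2 = 0 ∨ f p % 2 = 1 := by omega
    have hc' : ∀ q, (cnt.insert p (cnt.getD p 0 + 1)).getD q 0 =
        (fun q => if q = p then f q + 1 else f q) q := by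
      intro q
      rw [PySem.Dict.getD_insert]
      by_cases h : q = p
      · simp [h, hcp]
      · simp [h, hc q]
    have hnn' : ∀ q, 0 ≤ (fun q => if q = p then f q + 1 else f q) q := by
      intro q
      by_cases h : q = p
      · have := hnn p; simp [h]; omega
      · simpa [h] using hnn q
    have ihx := ih (cnt.insert p (cnt.getD p 0 + 1)) _ hc' hnn'
    rcases hpar with he | ho
    · -- even: A-side condition true, pending false
      rw [hmod, he]
      rw [if_pos rfl, if_neg (by simp)]
      have hfun : (fun q => decide ((if q = p then f q + 1 else f q) % 2 = 1)) =
          (fun q => if q = p then true else decide (f q % 2 = 1)) := by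
        funext q; by_cases h : q = p
        · simp [h]; omega
        · simp [h]
      rw [hfun] at ihx
      cases hf : rest.find? (fun x => x.1.2 == p) with
      | some x => simpa [hf] using congrArg (((d.1, x.2 - d.2)) :: ·) ihx
      | none => simpa [hf] using ihx
    · -- odd: A-side condition false, pending true
      rw [hmod, ho]
      rw [if_neg (by omega : ¬ ((1:Int) = 0)), if_pos (by simp)]
      have hfun : (fun q => decide ((if q = p then f q + 1 else f q) % 2 = 1)) =
          (fun q => if q = p then false else decide (f q % 2 = 1)) := by
        funext q; by_cases h : q = p
        · simp [h]; omega
        · simp [h]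
      rw [hfun] at ihx
      exact ihx

theorem pvStrip_false (l : List ((Int × Int) × Int)) : pvStrip l (fun _ => false) = l := by
  induction l with
  | nil => rfl
  | cons d rest ih =>
    simp only [pvStrip]
    rw [if_neg (by simp)]
    have : (fun q => if q = d.1.2 then false else false) = (fun _ : Int => false) := by
      funext q; split <;> rfl
    exact congrArg _ ih

theorem pvFindOff_strip_none (l : List ((Int × Int) × Int)) (S : Int → Bool) (p : Int)
    (hS : S p = false) (hf : l.find? (fun x => x.1.2 == p) = none) :
    pvFindOff p (pvStrip l S) = none ∧
      pvStrip l (fun q => if q = p then true else S q) = pvStrip l S := by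
  induction l generalizing S with
  | nil => exact ⟨rfl, rfl⟩
  | cons d rest ih =>
    have hd : ¬ ((fun x => x.1.2 == p) d = true) := by
      intro h
      rw [List.find?_cons_of_pos (p := fun x => x.1.2 == p) (a := d) (l := rest) h] at hf
      cases hf
    have hdp : d.1.2 ≠ p := by simpa using hd
    have hfr : rest.find? (fun x => x.1.2 == p) = none := by
      rw [List.find?_cons_of_neg (p := fun x => x.1.2 == p) (a := d) (l := rest) hd] at hf; exact hf
    simp only [pvStrip]
    by_cases hSd : S d.1.2 = true
    · have hS' : (fun q => if q = d.1.2 then false else S q) p = false := by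
        simp [Ne.symm hdp, hS]
      have := ih (fun q => if q = d.1.2 then false else S q) hS' hfr
      rw [if_pos hSd, if_pos (show (if d.1.2 = p then true else S d.1.2) = true by simp [hdp, hSd])]
      beta_reduce at this
      refine ⟨this.1, ?_⟩
      have hcomm : (fun q => if q = d.1.2 then false else if q = p then true else S q) =
          (fun q => if q = p then true else if q = d.1.2 then false else S q) := by
        funext q
        by_cases h1 : q = d.1.2
        · have h2 : ¬ q = p := fun h => hdp (h1.symm.trans h)
          simp [h1, hdp]
        · by_cases h2 : q = p
          · simp [h2, Ne.symm hdp]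
          · simp [h1, h2]
      rw [hcomm]
      exact this.2
    · have hSd' : S d.1.2 = false := by simpa using hSd
      have := ih S hS hfr
      rw [if_neg (by simp [hSd']), if_neg (by simp [hdp, hSd'])]
      constructor
      · simp only [pvFindOff, if_neg hdp, this.1]
      · exact congrArg _ this.2

theorem pvFindOff_strip_some (l : List ((Int × Int) × Int)) (S : Int → Bool) (p : Int)
    (x : (Int × Int) × Int) (hS : S p = false)
    (hf : l.find? (fun x => x.1.2 == p) = some x) :
    pvFindOff p (pvStrip l S) =
      some (x.2, pvStrip l (fun q => if q = p then true else S q)) := by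
  induction l generalizing S with
  | nil => simp at hf
  | cons d rest ih =>
    by_cases hdp : d.1.2 = p
    · have hx : x = d := by
        rw [List.find?_cons_of_pos (p := fun x => x.1.2 == p) (a := d) (l := rest) (by simp [hdp])] at hf
        cases hf; rfl
      subst hx
      simp only [pvStrip]
      rw [if_neg (by rw [hdp, hS]; simp), if_pos (by simp [hdp])]
      simp only [pvFindOff, if_pos hdp]
      have hfun : (fun q => if q = x.1.2 then false else if q = p then true else S q) = S := by
        funext q
        by_cases h : q = x.1.2
        · rw [if_pos h, h, hdp, hS]
        · have h2 : ¬ q = p := fun hq => h (hq.trans hdp.symm)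
          rw [if_neg h, if_neg h2]
      rw [hfun]
    · have hfr : rest.find? (fun x => x.1.2 == p) = some x := by
        rw [List.find?_cons_of_neg (p := fun x => x.1.2 == p) (a := d) (l := rest) (by simp [hdp])] at hf
        exact hf
      simp only [pvStrip]
      by_cases hSd : S d.1.2 = true
      · have hS' : (fun q => if q = d.1.2 then false else S q) p = false := by
          have hps : ¬ p = d.1.2 := fun h => hdp h.symm
          simp [hps, hS]
        rw [if_pos hSd, if_pos (show (if d.1.2 = p then true else S d.1.2) = true by simp [hdp, hSd])]
        have := ih (fun q => if q = d.1.2 then false else S q) hS' hfr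
        beta_reduce at this
        have hcomm : (fun q => if q = d.1.2 then false else if q = p then true else S q) =
            (fun q => if q = p then true else if q = d.1.2 then false else S q) := by
          funext q
          by_cases h1 : q = d.1.2
          · have h2 : ¬ q = p := fun h => hdp (h1.symm.trans h)
            simp [h1, hdp]
          · by_cases h2 : q = p
            · simp [h2, Ne.symm hdp]
            · simp [h1, h2]
        rw [hcomm]
        exact this
      · have hSd' : S d.1.2 = false := by simpa using hSd
        rw [if_neg (by simp [hSd']), if_neg (by simp [hdp, hSd'])]
        simp only [pvFindOff, if_neg hdp]
        rw [ih S hS hfr]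

theorem pvG_eq_A (l : List ((Int × Int) × Int)) (S : Int → Bool) :
    pvG l S = getNotePairs (pvStrip l S) := by
  induction l generalizing S with
  | nil => simp [pvG, pvStrip, getNotePairs]
  | cons d rest ih =>
    simp only [pvG, pvStrip]
    by_cases hSd : S d.1.2 = true
    · rw [if_pos hSd, if_pos hSd]; exact ih _
    · have hSd' : S d.1.2 = false := by simpa using hSd
      rw [if_neg (by simp [hSd']), if_neg (by simp [hSd'])]
      cases hf : rest.find? (fun x => x.1.2 == d.1.2) with
      | some x =>
        rw [getNotePairs]
        rw [pvFindOff_strip_some rest S d.1.2 x hSd' hf]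
        exact congrArg _ (ih _)
      | none =>
        rw [getNotePairs]
        have h2 := pvFindOff_strip_none rest S d.1.2 hSd' hf
        rw [h2.1, ← h2.2]
        exact ih _

-- ===== VERDICT (by name: the statement is the Claim_ definition above) =====
theorem getNotePairs_spec : Claim_equal_getNotePairs := by
  intro song _
  unfold Spec_getNotePairs getNotePairs_alt
  rw [pvNxts_fst]
  rw [pvEmit_eq_pvG song PySem.Dict.empty (fun _ => 0)
    (fun p => by simp [PySem.Dict.getD_empty]) (fun p => le_refl 0)]
  have : (fun p : Int => decide ((0 : Int) % 2 = 1)) = (fun _ : Int => false) := by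
    funext p; simp
  rw [this, pvG_eq_A, pvStrip_false]
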